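-- pv_equiv track=rewrite | github.com/StichCode/snake | snake.py | move_snake
-- ===== SOURCE A (Python) =====
-- def move_snake(coords, direction):
--     row = None
--     n = 0
--     for coord in coords:
--         if row != None:
--             if coord[0] > row:
--                 direction = 'UP'
--             elif coord[0] < row:
--                 direction = 'DOWN'
--             elif coord[1] > col:
--                 direction = 'LEFT'
--             else:
--                 direction = 'RIGHT'
--         row = coord[0]
--         col = coord[1]
--         if direction == 'UP':
--             coords[n] = (row - 1, col)
--         elif direction == 'DOWN':
--             coords[n] = (row + 1, col)
--         elif direction == 'LEFT':
--             coords[n] = (row, col - 1)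
--         else:
--             coords[n] = (row, col + 1)
--         n += 1
--
--     return coords, (row, col), direction
-- ===== SOURCE B (Python) =====
-- def _delta(d):
--     if d == 'UP':
--         return (-1, 0)
--     if d == 'DOWN':
--         return (1, 0)
--     if d == 'LEFT':
--         return (0, -1)
--     return (0, 1)
--
--
-- def move_snake(coords, direction):
--     # Pass 1: direction of each segment, read from the ORIGINAL coordinates.
--     dirs = [direction]
--     for (pr, pc), (r, c) in zip(coords, coords[1:]):
--         if r > pr:
--             dirs.append('UP')
--         elif r < pr:
--             dirs.append('DOWN')
--         elif c > pc:
--             dirs.append('LEFT')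
--         else:
--             dirs.append('RIGHT')
--     last = coords[-1]
--     # Pass 2: apply the deltas in place.
--     for i, d in enumerate(dirs):
--         dr, dc = _delta(d)
--         r, c = coords[i]
--         coords[i] = (r + dr, c + dc)
--     return coords, last, dirs[-1]
-- ===== Notes on version B (the rewrite author's own statement) =====
-- stated objective: alternative
-- what changed: B replaces A's single stateful loop (carrying previous row/col and a running direction) by two passes: first build the per-segment direction list from adjacent original coordinate pairs, then apply a direction->delta table to each coordinate.
import Mathlib
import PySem

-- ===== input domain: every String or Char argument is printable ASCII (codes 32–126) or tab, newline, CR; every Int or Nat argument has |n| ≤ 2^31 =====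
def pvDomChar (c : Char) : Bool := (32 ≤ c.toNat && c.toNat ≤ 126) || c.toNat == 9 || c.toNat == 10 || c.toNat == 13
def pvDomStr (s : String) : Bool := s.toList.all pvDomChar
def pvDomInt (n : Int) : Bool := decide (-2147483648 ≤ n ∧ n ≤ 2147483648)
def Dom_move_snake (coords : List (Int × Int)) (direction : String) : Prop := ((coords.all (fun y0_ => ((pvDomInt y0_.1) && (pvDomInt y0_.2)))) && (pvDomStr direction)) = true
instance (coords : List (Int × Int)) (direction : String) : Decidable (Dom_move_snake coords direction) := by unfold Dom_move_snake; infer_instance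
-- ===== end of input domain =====

-- B differs from A by decomposition (two passes instead of one stateful loop); the equivalence
-- claimed is about the return value (in Python both mutate `coords` in place to the same list).

-- ===== PORT A =====
-- A's loop, step for step: state = (updated prefix, row (None before the first iteration),
-- col, direction); `col` is only read once row ≠ None, matching Python's unbound `col`.
def msLoop (cs : List (Int × Int)) (acc : List (Int × Int)) (row? : Option Int)
    (col : Int) (dir : String) : List (Int × Int) × Option Int × Int × String :=
  match cs with
  | [] => (acc, row?, col, dir)
  | coord :: rest =>
    let dir' := match row? with
      | none => dir
      | some row =>
        if coord.1 > row then "UP"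
        else if coord.1 < row then "DOWN"
        else if coord.2 > col then "LEFT"
        else "RIGHT"
    let row := coord.1
    let col' := coord.2
    let new :=
      if dir' = "UP" then (row - 1, col')
      else if dir' = "DOWN" then (row + 1, col')
      else if dir' = "LEFT" then (row, col' - 1)
      else (row, col' + 1)
    msLoop rest (acc ++ [new]) (some row) col' dir'

def move_snake (coords : List (Int × Int)) (direction : String) : (List (Int × Int)) × (Int × Int) × String :=
  let st := msLoop coords [] none 0 direction
  -- on Pre_ (coords ≠ []) st.2.1 is `some row`; Python raises on [] (col unbound)
  (st.1, (st.2.1.getD 0, st.2.2.1), st.2.2.2)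

-- ===== PORT B =====
def msDelta (d : String) : Int × Int :=
  if d = "UP" then (-1, 0)
  else if d = "DOWN" then (1, 0)
  else if d = "LEFT" then (0, -1)
  else (0, 1)

def msDirOf (prev cur : Int × Int) : String :=
  if cur.1 > prev.1 then "UP"
  else if cur.1 < prev.1 then "DOWN"
  else if cur.2 > prev.2 then "LEFT"
  else "RIGHT"

def move_snake_alt (coords : List (Int × Int)) (direction : String) : (List (Int × Int)) × (Int × Int) × String :=
  -- pass 1: dirs[0] = direction, dirs[i] from adjacent original pairs
  let dirs := direction :: ((coords.zip (coords.drop 1)).map (fun p => msDirOf p.1 p.2))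
  let last := coords.getLast?.getD (0, 0)   -- coords[-1]; Python raises IndexError on [], excluded by Pre_
  -- pass 2: apply the deltas
  let moved := (coords.zip dirs).map (fun p => (p.1.1 + (msDelta p.2).1, p.1.2 + (msDelta p.2).2))
  (moved, last, dirs.getLastD direction)

-- ===== PRECONDITION & SPEC =====
-- Pre_ excludes only the empty list, on which A raises UnboundLocalError (col is never assigned).
def Pre_move_snake (coords : List (Int × Int)) (direction : String) : Prop := coords ≠ []
instance (coords : List (Int × Int)) (direction : String) : Decidable (Pre_move_snake coords direction) := by unfold Pre_move_snake; infer_instance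
def pvWitness_move_snake : (List (Int × Int)) × String := ([(3, 4), (3, 5), (2, 5)], "UP")

def Spec_move_snake (coords : List (Int × Int)) (direction : String) (out : (List (Int × Int)) × (Int × Int) × String) : Prop := out = move_snake_alt coords direction
instance (coords : List (Int × Int)) (direction : String) (out : (List (Int × Int)) × (Int × Int) × String) : Decidable (Spec_move_snake coords direction out) := by unfold Spec_move_snake; infer_instance

-- ===== CLAIM (what is proved, stated in full; the proofs are below) =====
def Claim_equal_move_snake : Prop := ∀ (coords : List (Int × Int)) (direction : String), Dom_move_snake coords direction → Pre_move_snake coords direction → Spec_move_snake coords direction (move_snake coords direction)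

-- ===== LEMMAS AND PROOFS =====

-- A's step applied to one coordinate equals B's delta form.
lemma msMove_eq (d : String) (c : Int × Int) :
    (if d = "UP" then (c.1 - 1, c.2)
     else if d = "DOWN" then (c.1 + 1, c.2)
     else if d = "LEFT" then (c.1, c.2 - 1)
     else (c.1, c.2 + 1)) = (c.1 + (msDelta d).1, c.2 + (msDelta d).2) := by
  unfold msDelta
  split_ifs <;> simp <;> ring

-- the invariant of A's loop once row is set: it appends B's per-segment moves,
-- tracks the last original coordinate, and ends with the last computed direction
lemma msLoop_some (rest : List (Int × Int)) :
    ∀ (acc : List (Int × Int)) (prev : Int × Int) (dir : String),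
    msLoop rest acc (some prev.1) prev.2 dir =
      (acc ++ (rest.zip (((prev :: rest).zip rest).map (fun p => msDirOf p.1 p.2))).map
          (fun p => (p.1.1 + (msDelta p.2).1, p.1.2 + (msDelta p.2).2)),
       some (rest.getLastD prev).1, (rest.getLastD prev).2,
       (dir :: ((prev :: rest).zip rest).map (fun p => msDirOf p.1 p.2)).getLastD dir) := by
  induction rest with
  | nil => intro acc prev dir; simp [msLoop]
  | cons x xs ih =>
    intro acc prev dir
    show msLoop (x :: xs) acc (some prev.1) prev.2 dir = _
    rw [msLoop]
    have hdir : (match some prev.1 with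
        | none => dir
        | some row =>
          if x.1 > row then "UP"
          else if x.1 < row then "DOWN"
          else if x.2 > prev.2 then "LEFT"
          else "RIGHT") = msDirOf prev x := by
      simp [msDirOf]
    simp only [hdir]
    rw [ih (acc ++ [_]) x (msDirOf prev x)]
    cases xs <;> simp [msMove_eq, List.getLastD]

theorem move_snake_spec : Claim_equal_move_snake := by
  intro coords direction _ hpre
  unfold Spec_move_snake
  match coords with
  | [] => exact absurd rfl hpre
  | x :: rest =>
    unfold move_snake move_snake_alt
    rw [msLoop]
    simp only [List.nil_append]
    rw [msLoop_some rest [_] x direction]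
    cases rest <;> simp [msMove_eq, List.getLastD, List.getLast?_eq_some_getLast]
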